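-- pv_equiv track=rewrite | github.com/cfcodefans/study-python3 | src/case_study/search_basic.py | minor_segments
-- ===== SOURCE A (Python) =====
-- from typing import List, Set, Dict, Iterator
--
-- def minor_segments(s: str) -> Set[str]:
--     """
--     Perform minor segmenting on a string, this is like major segmenting,
--     :except it also captures from the start of the input to each break
--     :param s:
--     :return:
--     """
--     minor_break: str = '_.'
--     last: int = -1
--     results: Set[str] = set()
--
--     for idx, ch in enumerate(s):
--         if ch in minor_break:
--             results.add(s[last + 1:idx])
--             results.add(s[:idx])
--             last = idx
--
--     results.add(s[last + 1:])
--     results.add(s)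
--     return results
-- ===== SOURCE B (Python) =====
-- def minor_segments(s: str) -> set:
--     # Chop the string segment by segment: repeatedly str.find the next break
--     # character in the remainder, emit the segment before it and the accumulated
--     # prefix, then continue on the rest.  No per-character scan, no index into s.
--     pieces = []
--     pref = ''
--     rest = s
--     while True:
--         i1, i2 = rest.find('_'), rest.find('.')
--         i = min(i1, i2) if (i1 >= 0 and i2 >= 0) else max(i1, i2)
--         if i < 0:
--             break
--         seg = rest[:i]
--         pieces += [seg, pref + seg]
--         pref += seg + rest[i]
--         rest = rest[i + 1:]
--     pieces += [rest, pref + rest]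
--     return set(pieces)
-- ===== Notes on version B (the rewrite author's own statement) =====
-- stated objective: faster
-- what changed: Replaced A's per-character Python loop (enumerate over s with a mutable last-break index and slices of s) by segment-wise chopping: a while-loop that uses str.find to locate the next break in the remainder, emits the segment and the accumulated prefix built by concatenation, and continues on the sliced-off rest, so only the break characters drive the Python-level loop.
import Mathlib
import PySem

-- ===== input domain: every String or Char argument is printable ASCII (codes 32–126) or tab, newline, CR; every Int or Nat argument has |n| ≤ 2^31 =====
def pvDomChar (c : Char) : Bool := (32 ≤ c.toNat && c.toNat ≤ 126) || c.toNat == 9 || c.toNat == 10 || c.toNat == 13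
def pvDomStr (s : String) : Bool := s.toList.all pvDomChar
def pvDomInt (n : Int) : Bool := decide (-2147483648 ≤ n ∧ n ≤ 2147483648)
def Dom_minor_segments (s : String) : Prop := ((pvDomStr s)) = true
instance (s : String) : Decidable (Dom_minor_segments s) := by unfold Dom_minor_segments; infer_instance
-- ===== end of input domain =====

-- B replaces A's per-character scan (enumerate with a mutable last-break index and
-- slicing of s) by segment-wise chopping: str.find locates the next break in the
-- remainder, the segment before it and the accumulated prefix are emitted, and the
-- loop continues on the rest, so only break characters drive the Python-level loop
-- (objective: faster by a constant factor, measured).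

-- ch in '_.' (one-char membership test, used by both ports)
def msBrk (ch : Char) : Bool := ch == '_' || ch == '.'

-- ===== PORT A =====
-- A's for-loop over enumerate(s) with state (last, results)
def msLoopA (s : String) : List (Int × Char) → Int → PySem.Set String → Int × PySem.Set String
  | [], last, r => (last, r)
  | (idx, ch) :: rest, last, r =>
    if msBrk ch then
      msLoopA s rest idx (PySem.Set.add (PySem.Set.add r
        (PySem.Str.slice s (some (last + 1)) (some idx)))       -- s[last+1:idx]
        (PySem.Str.slice s none (some idx)))                    -- s[:idx]
    else
      msLoopA s rest last r

def minor_segments (s : String) : List String :=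
  let p := msLoopA s (PySem.List.enumerate s.toList 0) (-1) PySem.Set.empty
  PySem.Set.add (PySem.Set.add p.2
    (PySem.Str.slice s (some (p.1 + 1)) none))                  -- s[last+1:]
    s

-- ===== PORT B =====
-- i = min(i1, i2) if (i1 >= 0 and i2 >= 0) else max(i1, i2), i1/i2 the two finds
def msNextBrk (rest : List Char) : Int :=
  let i1 := PySem.Chars.find rest ['_']
  let i2 := PySem.Chars.find rest ['.']
  if 0 ≤ i1 ∧ 0 ≤ i2 then min i1 i2 else max i1 i2

-- the while-loop: state (pref, rest), pieces emitted in order; str values kept as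
-- List Char (exact code points).  The guard's second conjunct i.toNat < rest.length
-- always holds when 0 ≤ i (a found index is in range); it only makes rest[i] and
-- termination explicit.
def msChop (pref rest : List Char) : List (List Char) :=
  let i := msNextBrk rest
  if h : 0 ≤ i ∧ i.toNat < rest.length then
    let seg := PySem.List.slice rest none (some i)              -- seg = rest[:i]
    [seg, pref ++ seg] ++                                       -- pieces += [seg, pref+seg]
      msChop (pref ++ seg ++ [rest[i.toNat]])                   -- pref += seg + rest[i]
        (PySem.List.slice rest (some (i + 1)) none)             -- rest = rest[i+1:]
  else
    [rest, pref ++ rest]                                        -- pieces += [rest, pref+rest]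
termination_by rest.length
decreasing_by
  · have h1 : (0:Int) ≤ i + 1 := by omega
    rw [PySem.List.slice_from (ha := h1)]
    have h2 : (i + 1).toNat = i.toNat + 1 := by omega
    simp only [List.length_drop, h2]
    omega

def minor_segments_alt (s : String) : List String :=
  PySem.Set.ofList ((msChop [] s.toList).map String.ofList)     -- set(pieces)

-- ===== PRECONDITION & SPEC =====
def Spec_minor_segments (s : String) (out : List String) : Prop := out = minor_segments_alt s
instance (s : String) (out : List String) : Decidable (Spec_minor_segments s out) := by unfold Spec_minor_segments; infer_instance

-- ===== CLAIM (what is proved, stated in full; the proofs are below) =====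
def Claim_equal_minor_segments : Prop := ∀ (s : String), Dom_minor_segments s → Spec_minor_segments s (minor_segments s)

-- ===== LEMMAS AND PROOFS =====

-- break indices of an enumerated suffix
def msBreaks (l : List (Int × Char)) : List Int := (l.filter (fun p => msBrk p.2)).map Prod.fst

-- pieces emitted by A's loop, in emission order
def msPieces (s : String) : List (Int × Char) → Int → List String
  | [], _ => []
  | (idx, ch) :: rest, last =>
    if msBrk ch then
      PySem.Str.slice s (some (last + 1)) (some idx) ::
      PySem.Str.slice s none (some idx) :: msPieces s rest idx
    else msPieces s rest last

-- per-character reference form of B's chopping: running segment and prefix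
def msPspec (pref seg : List Char) : List Char → List (List Char)
  | [] => [seg, pref ++ seg]
  | c :: t =>
    if msBrk c then seg :: (pref ++ seg) :: msPspec (pref ++ seg ++ [c]) [] t
    else msPspec pref (seg ++ [c]) t

-- position of the first break character
def msFb : List Char → Option Nat
  | [] => none
  | c :: t => if msBrk c then some 0 else (msFb t).map (· + 1)

-- Int views of index? / msFb (-1 for "absent")
def msIdx (cs : List Char) (b : Char) : Int :=
  (PySem.List.index? cs b).elim (-1) (fun k => (k : Int))
def msFbI (cs : List Char) : Int :=
  (msFb cs).elim (-1) (fun n => (n : Int))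

theorem msLoopA_eq (s : String) (l : List (Int × Char)) :
    ∀ (last : Int) (r : PySem.Set String),
      msLoopA s l last r = ((msBreaks l).getLastD last, PySem.Set.update r (msPieces s l last)) := by
  induction l with
  | nil => intro last r; simp [msLoopA, msBreaks, msPieces, PySem.Set.update]
  | cons p rest ih =>
    intro last r
    obtain ⟨idx, ch⟩ := p
    by_cases h : msBrk ch = true
    · simp only [msLoopA, msBreaks, msPieces, h, if_pos, List.filter_cons_of_pos, List.map_cons,
        List.getLastD_cons, ih, PySem.Set.update, List.foldl]
    · simp only [msLoopA, msBreaks, msPieces, h, if_neg, List.filter_cons_of_neg, ih,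
        Bool.false_eq_true, not_false_iff]

theorem msUpdate_append (r : PySem.Set String) (xs ys : List String) :
    PySem.Set.update r (xs ++ ys) = PySem.Set.update (PySem.Set.update r xs) ys := by
  simp [PySem.Set.update]

-- s.find(c) with a one-character needle is the first index of c, or -1
theorem msFind_singleton (cs : List Char) (b : Char) :
    PySem.Chars.find cs [b] = msIdx cs b := by
  by_cases hm : b ∈ cs
  · have hinf : [b] <:+: cs := by
      obtain ⟨l1, l2, rfl⟩ := List.append_of_mem hm
      exact ⟨l1, l2, by simp⟩
    have h0 : 0 ≤ PySem.Chars.find cs [b] := (PySem.Chars.find_nonneg_iff cs [b]).mpr hinf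
    obtain ⟨hpre, hmin⟩ := PySem.Chars.find_spec h0
    set n := (PySem.Chars.find cs [b]).toNat with hn
    obtain ⟨t, ht⟩ := hpre
    have hlt : n < cs.length := by
      have := congrArg List.length ht
      simp at this
      omega
    have hidx : PySem.List.index? cs b = some n := by
      rw [PySem.List.index?_eq_some_iff]
      refine ⟨cs.take n, t, ?_, by simp; omega, ?_⟩
      · conv_lhs => rw [← List.take_append_drop n cs, ← ht]
        simp
      · intro hmem
        obtain ⟨j, hj, hjv⟩ := List.mem_iff_getElem.mp hmem
        have hjn : j < n := (by simpa using hj : j < n ∧ j < cs.length).1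
        apply hmin j hjn
        refine ⟨cs.drop (j + 1), ?_⟩
        rw [List.getElem_take] at hjv
        rw [List.drop_eq_getElem_cons (by omega : j < cs.length), hjv]
        rfl
    unfold msIdx
    rw [hidx, Option.elim_some]
    omega
  · have h1 : PySem.Chars.find cs [b] = -1 := by
      rw [PySem.Chars.find_eq_neg_one_iff]
      intro hinf
      obtain ⟨l1, l2, he⟩ := hinf
      exact hm (by rw [← he]; simp)
    unfold msIdx
    rw [(PySem.List.index?_eq_none_iff cs b).mpr hm, Option.elim_none, h1]

theorem msIdx_nil (b : Char) : msIdx [] b = -1 := by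
  unfold msIdx
  rw [show PySem.List.index? ([] : List Char) b = none from
    (PySem.List.index?_eq_none_iff _ _).mpr (by simp)]
  rfl

theorem msIdx_cons_self (c : Char) (t : List Char) : msIdx (c :: t) c = 0 := by
  unfold msIdx
  rw [PySem.List.index?_cons_self]
  rfl

theorem msIdx_cons_of_ne (c b : Char) (t : List Char) (h : c ≠ b) :
    msIdx (c :: t) b = if 0 ≤ msIdx t b then msIdx t b + 1 else -1 := by
  unfold msIdx
  rw [PySem.List.index?_cons_of_ne t h]
  rcases o : PySem.List.index? t b with _ | k <;>
    simp only [Option.elim_none, Option.elim_some, Option.map_none, Option.map_some] <;>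
    [skip; push_cast] <;> split_ifs <;> omega

-- min/max of the two finds is the first break position, or -1
theorem msNextBrk_eq (cs : List Char) : msNextBrk cs = msFbI cs := by
  induction cs with
  | nil =>
    simp only [msNextBrk, msFind_singleton, msIdx_nil, msFbI, msFb, Option.elim_none]
    decide
  | cons c t ih =>
    simp only [msNextBrk, msFind_singleton] at ih ⊢
    by_cases h1 : c = '_'
    · subst h1
      rw [msIdx_cons_self, msIdx_cons_of_ne _ _ _ (by decide : '_' ≠ '.')]
      simp only [Option.elim_some, msFbI, msFb, msBrk,
        show ('_' == '_' || '_' == '.') = true from by decide, if_pos, Nat.cast_zero]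
      split_ifs <;> simp only [min_def, max_def] <;> split_ifs <;> omega
    · by_cases h2 : c = '.'
      · subst h2
        rw [msIdx_cons_self, msIdx_cons_of_ne _ _ _ (by decide : '.' ≠ '_')]
        simp only [Option.elim_some, msFbI, msFb, msBrk,
          show ('.' == '_' || '.' == '.') = true from by decide, if_pos, Nat.cast_zero]
        split_ifs <;> simp only [min_def, max_def] <;> split_ifs <;> omega
      · rw [msIdx_cons_of_ne _ _ _ h1, msIdx_cons_of_ne _ _ _ h2]
        have hb : msBrk c = false := by
          simp only [msBrk, Bool.or_eq_false_iff, beq_eq_false_iff_ne, ne_eq]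
          exact ⟨h1, h2⟩
        simp only [msFbI, msFb, hb, Bool.false_eq_true, if_neg, not_false_iff] at ih ⊢
        rcases o3 : msFb t with _ | m <;> rw [o3] at ih <;>
          simp only [Option.elim_none, Option.elim_some, Option.map_none, Option.map_some] at ih ⊢ <;>
          [skip; push_cast at ih ⊢] <;>
          split_ifs at ih ⊢ <;>
          simp only [min_def, max_def] at ih ⊢ <;> split_ifs at ih ⊢ <;> omega

theorem msFb_eq_some (cs : List Char) : ∀ (n : Nat), msFb cs = some n →
    ∃ a b t, cs = a ++ b :: t ∧ a.length = n ∧ (∀ c ∈ a, msBrk c = false) ∧ msBrk b = true := by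
  induction cs with
  | nil => intro n h; simp [msFb] at h
  | cons c t ih =>
    intro n h
    simp only [msFb] at h
    by_cases hb : msBrk c = true
    · simp only [hb, if_pos, Option.some.injEq] at h
      exact ⟨[], c, t, by simp, by simpa using h, by simp, hb⟩
    · simp only [hb, Bool.false_eq_true, if_neg, not_false_iff, Option.map_eq_some_iff] at h
      obtain ⟨m, hm, rfl⟩ := h
      obtain ⟨a, b, t', rfl, hl, hfree, hbb⟩ := ih m hm
      exact ⟨c :: a, b, t', by simp, by simp [hl], by
        intro x hx; rcases List.mem_cons.mp hx with rfl | hx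
        · simpa using hb
        · exact hfree x hx, hbb⟩

theorem msFb_eq_none (cs : List Char) (h : msFb cs = none) : ∀ c ∈ cs, msBrk c = false := by
  induction cs with
  | nil => simp
  | cons c t ih =>
    simp only [msFb] at h
    by_cases hb : msBrk c = true
    · simp [hb] at h
    · simp only [hb, if_neg, Option.map_eq_none_iff, Bool.false_eq_true, not_false_iff] at h
      intro x hx
      rcases List.mem_cons.mp hx with rfl | hx
      · simpa using hb
      · exact ih h x hx

theorem msPspec_no_brk (rest : List Char) (h : ∀ c ∈ rest, msBrk c = false) :
    ∀ pref seg, msPspec pref seg rest = [seg ++ rest, pref ++ (seg ++ rest)] := by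
  induction rest with
  | nil => intro pref seg; simp [msPspec]
  | cons c t ih =>
    intro pref seg
    have hc : msBrk c = false := h c (by simp)
    simp only [msPspec, hc, Bool.false_eq_true, if_neg, not_false_iff]
    rw [ih (fun x hx => h x (by simp [hx])) pref (seg ++ [c])]
    simp

theorem msPspec_skip (a : List Char) (h : ∀ c ∈ a, msBrk c = false) :
    ∀ pref seg rest, msPspec pref seg (a ++ rest) = msPspec pref (seg ++ a) rest := by
  induction a with
  | nil => intro pref seg rest; simp
  | cons c t ih =>
    intro pref seg rest
    have hc : msBrk c = false := h c (by simp)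
    simp only [List.cons_append, msPspec, hc, Bool.false_eq_true, if_neg, not_false_iff]
    rw [ih (fun x hx => h x (by simp [hx])) pref (seg ++ [c])]
    simp

theorem msChop_eq_pspec_aux (n : Nat) : ∀ (rest pref : List Char), rest.length ≤ n →
    msChop pref rest = msPspec pref [] rest := by
  induction n with
  | zero =>
    intro rest pref hlen
    have : rest = [] := List.eq_nil_of_length_eq_zero (by omega)
    subst this
    rw [msChop]
    norm_num [msNextBrk_eq, msFbI, msFb, msPspec]
  | succ n ih =>
    intro rest pref hlen
    rcases o : msFb rest with _ | k
    · have hi : msNextBrk rest = -1 := by rw [msNextBrk_eq, msFbI, o]; rfl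
      rw [msChop]
      simp only [hi, show ¬((0:Int) ≤ -1 ∧ ((-1:Int)).toNat < rest.length) from by omega,
        dite_false]
      rw [msPspec_no_brk rest (msFb_eq_none rest o) pref []]
      simp
    · obtain ⟨a, b, t, rfl, hl, hfree, hbb⟩ := msFb_eq_some rest k o
      have hi : msNextBrk (a ++ b :: t) = (k : Int) := by rw [msNextBrk_eq, msFbI, o]; rfl
      have hklen : k < (a ++ b :: t).length := by simp; omega
      rw [msChop]
      simp only [hi]
      rw [dif_pos ⟨by omega, by simpa using hklen⟩]
      have hseg : PySem.List.slice (a ++ b :: t) none (some (k : Int)) = a := by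
        rw [PySem.List.slice_to_natCast]
        subst hl
        exact List.take_left ..
      have hget : (a ++ b :: t)[((k : Int)).toNat]'(by simpa using hklen) = b := by
        subst hl
        simp
      have hdrop : PySem.List.slice (a ++ b :: t) (some ((k : Int) + 1)) none = t := by
        have : ((k : Int) + 1) = ((k + 1 : Nat) : Int) := by push_cast; ring
        rw [this, PySem.List.slice_from_natCast]
        subst hl
        rw [← List.drop_drop]
        rw [List.drop_left]
        simp
      rw [hseg, hget, hdrop]
      rw [ih t _ (by simp at hlen; omega)]
      rw [msPspec_skip a hfree pref [] (b :: t)]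
      simp only [List.nil_append, msPspec, hbb, if_pos]
      rfl

theorem msChop_eq_pspec (rest pref : List Char) : msChop pref rest = msPspec pref [] rest :=
  msChop_eq_pspec_aux rest.length rest pref (le_refl _)

-- A's pieces (with the two trailing additions) coincide with B's, per character
theorem msMain (s : String) (t : List Char) :
    ∀ (p j : Nat), j ≤ p → t = s.toList.drop p →
      (msPspec (s.toList.take j) ((s.toList.drop j).take (p - j)) t).map String.ofList
      = msPieces s (PySem.List.enumerate t (p : Int)) ((j : Int) - 1)
        ++ [PySem.Str.slice s (some (((msBreaks (PySem.List.enumerate t (p : Int))).getLastD ((j : Int) - 1)) + 1)) none, s] := by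
  have hslice : ∀ a b, PySem.Str.slice s a b = String.ofList (PySem.List.slice s.toList a b) :=
    fun _ _ => rfl
  induction t with
  | nil =>
    intro p j hjp ht
    have hlen : s.toList.length ≤ p := by
      have := congrArg List.length ht
      simp only [List.length_nil, List.length_drop] at this
      omega
    simp only [msPspec, List.map_cons, List.map_nil, PySem.List.enumerate_nil, msPieces,
      msBreaks, List.filter_nil, List.map_nil, List.getLastD_nil, List.nil_append]
    rw [show ((j : Int) - 1 + 1) = ((j : Nat) : Int) from by ring]
    rw [hslice, PySem.List.slice_from_natCast]
    have hseg : (s.toList.drop j).take (p - j) = s.toList.drop j :=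
      List.take_of_length_le (by simp only [List.length_drop]; omega)
    rw [hseg, List.take_append_drop]
    simp
  | cons c t' ih =>
    intro p j hjp ht
    have hp : p < s.toList.length := by
      by_contra hcon
      rw [List.drop_eq_nil_of_le (by omega)] at ht
      exact List.cons_ne_nil c t' ht
    have hcons := List.drop_eq_getElem_cons hp
    rw [← ht] at hcons
    injection hcons with hc ht'
    have htake : s.toList.take j ++ (s.toList.drop j).take (p - j) = s.toList.take p := by
      have hpj : j + (p - j) = p := by omega
      rw [← hpj, List.take_add]
      have h2 : j + (p - j) - j = p - j := by omega
      rw [h2]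
    have henum : PySem.List.enumerate (c :: t') (p : Int)
        = ((p : Int), c) :: PySem.List.enumerate t' (((p + 1 : Nat) : Int)) := by
      rw [PySem.List.enumerate_cons]
      push_cast
      rfl
    by_cases hb : msBrk c = true
    · have hbrkc : msBreaks (((p : Int), c) :: PySem.List.enumerate t' (((p + 1 : Nat)) : Int))
          = (p : Int) :: msBreaks (PySem.List.enumerate t' (((p + 1 : Nat)) : Int)) := by
        simp [msBreaks, hb]
      have hpref : s.toList.take j ++ (s.toList.drop j).take (p - j) ++ [c] = s.toList.take (p + 1) := by
        rw [htake, List.take_add_one, List.getElem?_eq_getElem hp, ← hc]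
        rfl
      simp only [msPspec, hb, if_pos, List.map_cons, henum, msPieces, hbrkc,
        List.getLastD_cons, List.cons_append]
      have hih := ih (p + 1) (p + 1) (le_refl _) ht'
      simp only [Nat.sub_self, List.take_zero] at hih
      rw [show (((p + 1 : Nat) : Int)) - 1 = ((p : Nat) : Int) from by push_cast; ring] at hih
      rw [hpref, hih]
      congr 1
      · rw [show ((j : Int) - 1 + 1) = ((j : Nat) : Int) from by ring, hslice,
          PySem.List.slice_natCast]
      congr 1
      rw [hslice, PySem.List.slice_to_natCast, ← htake]
    · have hbrkn : msBreaks (((p : Int), c) :: PySem.List.enumerate t' (((p + 1 : Nat)) : Int))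
          = msBreaks (PySem.List.enumerate t' (((p + 1 : Nat)) : Int)) := by
        simp [msBreaks, hb]
      simp only [msPspec, hb, if_neg, Bool.false_eq_true, not_false_iff, henum,
        msPieces, hbrkn]
      have hsegc : (s.toList.drop j).take (p - j) ++ [c] = (s.toList.drop j).take (p + 1 - j) := by
        rw [show p + 1 - j = (p - j) + 1 from by omega, List.take_add_one, List.getElem?_drop]
        rw [show j + (p - j) = p from by omega, List.getElem?_eq_getElem hp, ← hc]
        rfl
      rw [hsegc]
      exact ih (p + 1) j (by omega) ht'

-- ===== VERDICT (by name: the statement is the Claim_ definition above) =====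
theorem minor_segments_spec : Claim_equal_minor_segments := by
  intro s _
  show minor_segments s = minor_segments_alt s
  unfold minor_segments minor_segments_alt
  rw [msLoopA_eq]
  rw [PySem.Set.ofList_eq_foldl]
  show _ = PySem.Set.update PySem.Set.empty _
  rw [msChop_eq_pspec]
  have hm := msMain s s.toList 0 0 (le_refl 0) (by simp)
  simp only [List.take_zero, List.drop_zero, Nat.sub_self, Nat.cast_zero, zero_sub] at hm
  dsimp only
  rw [hm, msUpdate_append]
  simp [PySem.Set.update]
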